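-- pv_equiv track=rewrite | github.com/AhmedMohamedEzaat/python | proplem solveng.py | new_numbers
-- ===== SOURCE A (Python) =====
-- def new_numbers(x, y):
--     odd=[]
--     even=[]
--     for new_numbers in range (x , y+1):
--         if new_numbers % 2 == 0 :
--             even.append(new_numbers)
--         else:
--             odd.append(new_numbers)
--
--     return f"odd :{odd} ,\n ,even : {even}"
-- ===== SOURCE B (Python) =====
-- def new_numbers(x, y):
--     fe = x if x % 2 == 0 else x + 1
--     fo = x if x % 2 == 1 else x + 1
--     odd = list(range(fo, y + 1, 2))
--     even = list(range(fe, y + 1, 2))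
--     return f"odd :{odd} ,\n ,even : {even}"
-- ===== Notes on version B (the rewrite author's own statement) =====
-- stated objective: idiomatic
-- what changed: B computes the first even and first odd value once and builds each parity list directly with a stride-2 range, removing the per-element modulo test and Python-level branch of A's single scan.
import Mathlib
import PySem

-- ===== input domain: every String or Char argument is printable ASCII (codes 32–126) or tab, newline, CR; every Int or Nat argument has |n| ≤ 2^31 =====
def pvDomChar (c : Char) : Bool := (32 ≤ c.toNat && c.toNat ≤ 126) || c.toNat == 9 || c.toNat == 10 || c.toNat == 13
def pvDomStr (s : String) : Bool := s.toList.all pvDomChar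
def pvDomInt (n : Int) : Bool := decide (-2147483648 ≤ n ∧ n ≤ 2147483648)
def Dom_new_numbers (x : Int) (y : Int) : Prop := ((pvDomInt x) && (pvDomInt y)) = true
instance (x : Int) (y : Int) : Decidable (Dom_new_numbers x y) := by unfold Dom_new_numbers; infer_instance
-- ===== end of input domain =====

-- B replaces A's per-element parity test over range(x, y+1) by two stride-2 ranges
-- starting at the first odd / first even value (objective: idiomatic); same return string.

-- f-string rendering of a Python list of ints, e.g. "[1, 2]" (exact for int lists)
def pvReprIntList (xs : List Int) : String :=
  "[" ++ String.intercalate ", " (xs.map PySem.Int.toStr) ++ "]"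

-- ===== PORT A =====
def new_numbers (x : Int) (y : Int) : String :=
  let p := (PySem.List.pyRange x (y + 1) 1).foldl
    (fun (acc : List Int × List Int) n =>
      if PySem.Int.mod n 2 = 0 then (acc.1, acc.2 ++ [n]) else (acc.1 ++ [n], acc.2))
    ([], [])
  "odd :" ++ pvReprIntList p.1 ++ " ,\n ,even : " ++ pvReprIntList p.2

-- ===== PORT B =====
def pvEvenStart (x : Int) : Int := if PySem.Int.mod x 2 = 0 then x else x + 1
def pvOddStart (x : Int) : Int := if PySem.Int.mod x 2 = 1 then x else x + 1

def new_numbers_alt (x : Int) (y : Int) : String :=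
  let odd := PySem.List.pyRange (pvOddStart x) (y + 1) 2
  let even := PySem.List.pyRange (pvEvenStart x) (y + 1) 2
  "odd :" ++ pvReprIntList odd ++ " ,\n ,even : " ++ pvReprIntList even

-- ===== PRECONDITION & SPEC =====
def Spec_new_numbers (x : Int) (y : Int) (out : String) : Prop := out = new_numbers_alt x y
instance (x : Int) (y : Int) (out : String) : Decidable (Spec_new_numbers x y out) := by unfold Spec_new_numbers; infer_instance

-- ===== CLAIM (what is proved, stated in full; the proofs are below) =====
def Claim_equal_new_numbers : Prop := ∀ (x : Int) (y : Int), Dom_new_numbers x y → Spec_new_numbers x y (new_numbers x y)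

-- ===== LEMMAS AND PROOFS =====

lemma pyRange_two_nil (a b : Int) (h : b ≤ a) : PySem.List.pyRange a b 2 = [] := by
  rw [PySem.List.pyRange_of_pos a b (by norm_num)]
  simp [show ¬ a < b by omega]

lemma pyRange_two_cons (a b : Int) (h : a < b) :
    PySem.List.pyRange a b 2 = a :: PySem.List.pyRange (a + 2) b 2 := by
  rw [PySem.List.pyRange_of_pos a b (by norm_num),
      PySem.List.pyRange_of_pos (a + 2) b (by norm_num)]
  have hn : (if a < b then ((b - a + 2 - 1) / 2).toNat else 0)
      = (if a + 2 < b then ((b - (a + 2) + 2 - 1) / 2).toNat else 0) + 1 := by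
    split_ifs <;> omega
  rw [hn, List.range_succ_eq_map]
  simp [List.map_map, Function.comp]
  intro k _
  ring

lemma loop_split (n : Nat) (a b : Int) (hb : b - a ≤ (n : Int)) (o e : List Int) :
    (PySem.List.pyRange a b 1).foldl
      (fun (acc : List Int × List Int) m =>
        if PySem.Int.mod m 2 = 0 then (acc.1, acc.2 ++ [m]) else (acc.1 ++ [m], acc.2))
      (o, e)
    = (o ++ PySem.List.pyRange (pvOddStart a) b 2,
       e ++ PySem.List.pyRange (pvEvenStart a) b 2) := by
  induction n generalizing a o e with
  | zero =>
      rw [PySem.List.pyRange_one_eq_nil (by omega)]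
      have h1 : PySem.List.pyRange (pvOddStart a) b 2 = [] := by
        apply pyRange_two_nil; unfold pvOddStart; split_ifs <;> omega
      have h2 : PySem.List.pyRange (pvEvenStart a) b 2 = [] := by
        apply pyRange_two_nil; unfold pvEvenStart; split_ifs <;> omega
      simp [h1, h2]
  | succ k ih =>
      by_cases hab : a < b
      · rw [PySem.List.pyRange_one_cons hab, List.foldl_cons]
        have hm : ∀ z : Int, PySem.Int.mod z 2 = z % 2 :=
          fun z => PySem.Int.mod_eq_emod_of_pos (by norm_num)
        rcases PySem.Int.mod_two_eq a with hp | hp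
        · rw [if_pos hp, ih (a + 1) (by omega)]
          rw [hm] at hp
          have ho : pvOddStart (a + 1) = pvOddStart a := by
            simp only [pvOddStart, hm]; split_ifs <;> omega
          have he : pvEvenStart a = a := by
            simp only [pvEvenStart, hm]; split_ifs <;> omega
          have he2 : pvEvenStart (a + 1) = a + 2 := by
            simp only [pvEvenStart, hm]; split_ifs <;> omega
          rw [ho, he, he2, pyRange_two_cons a b hab]
          simp
        · rw [if_neg (by rw [hp]; norm_num), ih (a + 1) (by omega)]
          rw [hm] at hp
          have ho : pvOddStart a = a := by
            simp only [pvOddStart, hm]; split_ifs <;> omega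
          have ho2 : pvOddStart (a + 1) = a + 2 := by
            simp only [pvOddStart, hm]; split_ifs <;> omega
          have he : pvEvenStart (a + 1) = pvEvenStart a := by
            simp only [pvEvenStart, hm]; split_ifs <;> omega
          rw [ho2, he, ho, pyRange_two_cons a b hab]
          simp
      · rw [PySem.List.pyRange_one_eq_nil (by omega)]
        have h1 : PySem.List.pyRange (pvOddStart a) b 2 = [] := by
          apply pyRange_two_nil; unfold pvOddStart; split_ifs <;> omega
        have h2 : PySem.List.pyRange (pvEvenStart a) b 2 = [] := by
          apply pyRange_two_nil; unfold pvEvenStart; split_ifs <;> omega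
        simp [h1, h2]

-- ===== VERDICT (by name: the statement is the Claim_ definition above) =====
theorem new_numbers_spec : Claim_equal_new_numbers := by
  intro x y _
  unfold Spec_new_numbers new_numbers new_numbers_alt
  rw [loop_split ((y + 1 - x).toNat) x (y + 1) (by omega) [] []]
  simp
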